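-- pv_equiv track=rewrite | github.com/dev1nagaich/Audio-Speech-Processing-Assignment-Q1-Q2- | scripts/07_fix_and_reeval.py | is_repetition_loop
-- ===== SOURCE A (Python) =====
-- from typing import Dict, List, Tuple
-- from collections import defaultdict
--
-- def is_repetition_loop(text: str, threshold: int = 5) -> bool:
--     """Return True if any single token appears >= threshold times total."""
--     words = text.split()
--     if not words:
--         return False
--     freq: Dict[str, int] = defaultdict(int)
--     for w in words:
--         freq[w] += 1
--     return max(freq.values()) >= threshold
-- ===== SOURCE B (Python) =====
-- def is_repetition_loop(text: str, threshold: int = 5) -> bool: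
--     """Return True if any single token appears >= threshold times total."""
--     ws = sorted(text.split())
--     if not ws:
--         return False
--     prev = ws[0]
--     run = best = 1
--     for w in ws[1:]:
--         run = run + 1 if w == prev else 1
--         if run > best:
--             best = run
--         prev = w
--     return best >= threshold
-- ===== Notes on version B (the rewrite author's own statement) =====
-- stated objective: alternative
-- what changed: Replaces the frequency-dict tally and max() over its values by sorting the token list so equal tokens are adjacent and doing one linear scan that tracks the current and maximal run of consecutive equal tokens.
import Mathlib
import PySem

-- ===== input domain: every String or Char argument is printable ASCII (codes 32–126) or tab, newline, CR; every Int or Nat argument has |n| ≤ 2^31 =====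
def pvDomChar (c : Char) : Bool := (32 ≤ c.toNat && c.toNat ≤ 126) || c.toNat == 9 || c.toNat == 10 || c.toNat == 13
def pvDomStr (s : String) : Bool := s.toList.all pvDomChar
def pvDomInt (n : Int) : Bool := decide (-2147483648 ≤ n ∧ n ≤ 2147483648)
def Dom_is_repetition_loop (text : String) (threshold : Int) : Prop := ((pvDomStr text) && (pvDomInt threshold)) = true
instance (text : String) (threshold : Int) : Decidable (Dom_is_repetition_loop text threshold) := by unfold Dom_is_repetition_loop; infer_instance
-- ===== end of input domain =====

-- B replaces A's frequency dict + max() by sorting the tokens and one linear scan for the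
-- longest run of consecutive equal tokens (alternative algorithm; not claimed faster).

-- ===== PORT A =====
def is_repetition_loop (text : String) (threshold : Int) : Bool :=
  let words := PySem.Str.split₀ text
  if words = [] then false
  else
    let freq : PySem.Dict String Int :=
      words.foldl (fun d w => d.insert w (d.getD w 0 + 1)) PySem.Dict.empty
    -- max(freq.values()): words ≠ [] so values ≠ []; the none branch is unreachable
    match PySem.List.max? freq.values (fun v => v) with
    | some m => decide (threshold ≤ m)
    | none => false

-- ===== PORT B =====
-- the for-loop of Source B: state (prev, run, best), one step per remaining word
def pvScan : String → Int → Int → List String → Int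
  | _, _, best, [] => best
  | prev, run, best, w :: rest =>
      let run' := if w == prev then run + 1 else 1
      pvScan w run' (if run' > best then run' else best) rest

def is_repetition_loop_alt (text : String) (threshold : Int) : Bool :=
  let ws := PySem.List.sorted (PySem.Str.split₀ text) (fun w => w) false
  match ws with
  | [] => false
  | h :: t => decide (threshold ≤ pvScan h 1 1 t)

-- ===== PRECONDITION & SPEC =====
def Spec_is_repetition_loop (text : String) (threshold : Int) (out : Bool) : Prop := out = is_repetition_loop_alt text threshold
instance (text : String) (threshold : Int) (out : Bool) : Decidable (Spec_is_repetition_loop text threshold out) := by unfold Spec_is_repetition_loop; infer_instance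

-- ===== CLAIM (what is proved, stated in full; the proofs are below) =====
def Claim_equal_is_repetition_loop : Prop := ∀ (text : String) (threshold : Int), Dom_is_repetition_loop text threshold → Spec_is_repetition_loop text threshold (is_repetition_loop text threshold)

-- ===== LEMMAS AND PROOFS =====

-- values of the counting fold are exactly the counts of the distinct words
theorem values_counter_eq {α : Type} [BEq α] [LawfulBEq α] (ws : List α) :
    (PySem.Dict.counter ws).values = (PySem.Set.ofList ws).map (fun k => (ws.count k : Int)) := by
  have h := PySem.Dict.items_counter ws
  simp [PySem.Dict.values, h, List.map_map]

-- A's core: max of the counter values reaches the threshold iff some word's count does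
theorem max_counter_iff_any (ws : List String) (threshold : Int) (hne : ws ≠ []) :
    (match PySem.List.max? (PySem.Dict.counter ws).values (fun v => v) with
     | some m => decide (threshold ≤ m)
     | none => false)
    = ws.any (fun w => decide (threshold ≤ (ws.count w : Int))) := by
  rw [values_counter_eq]
  cases hmax : PySem.List.max? ((PySem.Set.ofList ws).map (fun k => (ws.count k : Int))) (fun v => v) with
  | none =>
      exfalso
      rw [PySem.List.max?_eq_none_iff, List.map_eq_nil_iff] at hmax
      obtain ⟨x, t, rfl⟩ := List.exists_cons_of_ne_nil hne
      have : x ∈ PySem.Set.ofList (x :: t) := by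
        rw [PySem.Set.mem_ofList]; exact List.mem_cons_self
      simp [hmax] at this
  | some m =>
      rw [Bool.eq_iff_iff]
      simp only [List.any_eq_true, decide_eq_true_eq]
      constructor
      · intro hm
        have hmem := PySem.List.max?_mem hmax
        obtain ⟨k, hk, hkm⟩ := List.mem_map.mp hmem
        exact ⟨k, (PySem.Set.mem_ofList _ _).mp hk, by rw [hkm]; exact hm⟩
      · rintro ⟨w, hw, hcnt⟩
        have hwin : ((ws.count w : Int)) ∈ (PySem.Set.ofList ws).map (fun k => (ws.count k : Int)) :=
          List.mem_map.mpr ⟨w, (PySem.Set.mem_ofList _ _).mpr hw, rfl⟩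
        have := PySem.List.max?_isMax hmax _ hwin
        exact le_trans hcnt this

-- proof-only abstraction of the scan: the maximal run value seen from here on
-- (the accumulator 'best' stripped away)
def pvM : String → Int → List String → Int
  | _, run, [] => run
  | prev, run, w :: rest =>
      let run' := if w == prev then run + 1 else 1
      max run' (pvM w run' rest)

theorem pvM_ge_one : ∀ (rest : List String) (prev : String) (run : Int), 1 ≤ run → 1 ≤ pvM prev run rest := by
  intro rest
  induction rest with
  | nil => intro prev run h; simpa [pvM] using h
  | cons w rest ih =>
      intro prev run h
      simp only [pvM, le_max_iff]
      by_cases hw : (w == prev) = true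
      · simp [hw]; omega
      · simp [hw]

theorem pvScan_eq (rest : List String) : ∀ (prev : String) (run best : Int), run ≤ best →
    pvScan prev run best rest = max best (pvM prev run rest) := by
  induction rest with
  | nil => intro prev run best h; simp [pvScan, pvM]; omega
  | cons w rest ih =>
      intro prev run best h
      simp only [pvScan, pvM]
      rcases Bool.eq_false_or_eq_true (w == prev) with hw | hw <;>
        simp only [hw, Bool.false_eq_true, if_false, if_true]
      · rw [ih w (run + 1) _ (by split <;> omega)]
        generalize pvM w (run + 1) rest = X
        split <;> omega
      · rw [ih w 1 _ (by split <;> omega)]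
        generalize pvM w 1 rest = X
        split <;> omega

theorem pvM_replicate : ∀ (k : Nat) (p : String) (run : Int),
    pvM p run (List.replicate k p) = run + k := by
  intro k
  induction k with
  | zero => intro p run; simp [pvM]
  | succ k ih =>
      intro p run
      simp only [List.replicate_succ, pvM, BEq.refl, if_true, ih]
      push_cast
      omega

theorem pvM_chunk : ∀ (k : Nat) (p w : String) (run : Int) (u : List String), w ≠ p →
    pvM p run (List.replicate k p ++ w :: u)
      = max (if k = 0 then 1 else run + k) (pvM w 1 u) := by
  intro k
  induction k with
  | zero =>
      intro p w run u hw
      simp [pvM, beq_iff_eq, hw]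
  | succ k ih =>
      intro p w run u hw
      simp only [List.replicate_succ, List.cons_append, pvM, BEq.refl, if_true]
      rw [ih p w (run + 1) u hw]
      have hX : 1 ≤ pvM w 1 u := pvM_ge_one u w 1 le_rfl
      generalize pvM w 1 u = X at hX
      rcases Nat.eq_zero_or_pos k with hk | hk
      · subst hk; simp; omega
      · have : k ≠ 0 := by omega
        simp only [this, if_false, Nat.succ_ne_zero]
        push_cast
        omega

-- the maximal run of a sorted list reaches z iff some word count does
theorem pvM_count : ∀ (n : Nat) (l : List String), l.length ≤ n →
    l.Pairwise (· ≤ ·) → ∀ (h : String) (t : List String), l = h :: t → ∀ z : Int,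
    (z ≤ pvM h 1 t ↔ ∃ w ∈ l, z ≤ (l.count w : Int)) := by
  intro n
  induction n with
  | zero => intro l hl _ h t hlht; subst hlht; simp at hl
  | succ n ih =>
      intro l hl hp h t hlht z
      subst hlht
      -- decompose t into the leading run of h and the rest
      set k := (t.takeWhile (· == h)).length with hk
      set u := t.dropWhile (· == h) with hu
      have htdec : t = List.replicate k h ++ u := by
        have h1 : t.takeWhile (· == h) = List.replicate k h := by
          apply List.eq_replicate_length.mpr
          intro b hb
          have hb' := List.mem_takeWhile_imp (p := fun x => x == h) hb
          exact eq_of_beq hb'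
        conv_lhs => rw [← List.takeWhile_append_dropWhile (p := (· == h)) (l := t)]
        rw [h1]
      have hhead : ∀ w u', u = w :: u' → w ≠ h := by
        intro w u' huw
        have := List.head?_dropWhile_not (· == h) t
        rw [← hu, huw] at this
        simp at this
        exact this
      have hut : u.Sublist t := hu ▸ List.dropWhile_sublist _
      have hpu : u.Pairwise (· ≤ ·) := (List.pairwise_cons.mp hp).2.sublist hut
      have hht : ∀ x ∈ t, h ≤ x := (List.pairwise_cons.mp hp).1
      have hnu : h ∉ u := by
        intro hmem
        cases huc : u with
        | nil => rw [huc] at hmem; simp at hmem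
        | cons w u' =>
            have hwh : w ≠ h := hhead w u' huc
            have hwt : w ∈ t := hut.mem (by rw [huc]; exact List.mem_cons_self)
            have h1 : h ≤ w := hht w hwt
            have h2 : h < w := lt_of_le_of_ne h1 (Ne.symm hwh)
            rw [huc] at hmem
            rcases List.mem_cons.mp hmem with rfl | hmem'
            · exact absurd rfl hwh
            · have := (List.pairwise_cons.mp (huc ▸ hpu)).1 h hmem'
              exact absurd (lt_of_lt_of_le h2 this) (lt_irrefl h)
      have hcounth : ((h :: t).count h : Int) = 1 + k := by
        rw [htdec]
        simp [List.count_append, List.count_eq_zero.mpr hnu]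
        omega
      have hcountu : ∀ x ∈ u, ((h :: t).count x : Int) = (u.count x : Int) := by
        intro x hx
        have hxh : x ≠ h := fun he => hnu (he ▸ hx)
        have hhx : ¬ (h = x) := fun he => hxh he.symm
        rw [htdec]
        simp [List.count_append, List.count_replicate, hhx, beq_iff_eq]
      have hmemsplit : ∀ x, x ∈ h :: t ↔ x = h ∨ x ∈ u := by
        intro x
        rw [htdec]
        simp [List.mem_cons, List.mem_append, List.mem_replicate]
        tauto
      cases huc : u with
      | nil =>
          have hpv : pvM h 1 t = 1 + k := by
            rw [htdec, huc, List.append_nil, pvM_replicate]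
          rw [hpv]
          constructor
          · intro hz; exact ⟨h, List.mem_cons_self, by rw [hcounth]; omega⟩
          · rintro ⟨w, hw, hcw⟩
            rcases (hmemsplit w).mp hw with rfl | hwu
            · rw [hcounth] at hcw; omega
            · rw [huc] at hwu; simp at hwu
      | cons w u' =>
          have hwh : w ≠ h := hhead w u' huc
          have hulen : u.length ≤ n := by
            have := List.length_append (as := List.replicate k h) (bs := u)
            have ht' : t.length = k + u.length := by rw [htdec]; simp
            have : (h :: t).length ≤ n + 1 := hl
            simp [List.length_cons, ht'] at this
            omega
          have hIH := ih u hulen hpu w u' huc z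
          have hXge : 1 ≤ pvM w 1 u' := pvM_ge_one u' w 1 le_rfl
          have hpv : pvM h 1 t = max (1 + (k : Int)) (pvM w 1 u') := by
            rw [htdec, huc, pvM_chunk k h w 1 u' hwh]
            split <;> omega
          rw [hpv, le_max_iff]
          constructor
          · rintro (hz | hz)
            · exact ⟨h, List.mem_cons_self, by rw [hcounth]; omega⟩
            · obtain ⟨x, hx, hcx⟩ := hIH.mp hz
              have hxm : x ∈ u := huc ▸ hx
              refine ⟨x, (hmemsplit x).mpr (Or.inr hxm), ?_⟩
              rw [hcountu x hxm]
              exact hcx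
          · rintro ⟨x, hx, hcx⟩
            rcases (hmemsplit x).mp hx with rfl | hxu
            · left; rw [hcounth] at hcx; omega
            · right
              apply hIH.mpr
              refine ⟨x, hxu, ?_⟩
              rw [← hcountu x hxu]
              exact hcx

-- bridge: A's "any word's count reaches the threshold" equals B's sorted scan
theorem any_count_eq_scan (ws : List String) (threshold : Int) :
    ws.any (fun w => decide (threshold ≤ (ws.count w : Int)))
      = (match PySem.List.sorted ws (fun w => w) false with
         | [] => false
         | h :: t => decide (threshold ≤ pvScan h 1 1 t)) := by
  cases hs : PySem.List.sorted ws (fun w => w) false with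
  | nil =>
      have : ws = [] := (PySem.List.sorted_eq_nil_iff ws (fun w => w) false).mp hs
      subst this; simp
  | cons h t =>
      have hperm : (h :: t).Perm ws := hs ▸ PySem.List.sorted_perm ws (fun w => w) false
      have hp : (h :: t).Pairwise (· ≤ ·) := by
        have := PySem.List.sorted_pairwise ws (fun w : String => w) (κ := String)
        rw [hs] at this
        exact this
      have hM := pvM_count (h :: t).length (h :: t) le_rfl hp h t rfl threshold
      have hscan : pvScan h 1 1 t = pvM h 1 t := by
        rw [pvScan_eq t h 1 1 le_rfl]
        have := pvM_ge_one t h 1 le_rfl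
        omega
      rw [Bool.eq_iff_iff]
      simp only [List.any_eq_true, decide_eq_true_eq, hscan]
      rw [hM]
      constructor
      · rintro ⟨w, hw, hc⟩
        exact ⟨w, hperm.mem_iff.mpr hw, by rw [hperm.count_eq]; exact hc⟩
      · rintro ⟨w, hw, hc⟩
        exact ⟨w, hperm.mem_iff.mp hw, by rw [← hperm.count_eq]; exact hc⟩

-- ===== VERDICT (by name: the statement is the Claim_ definition above) =====
theorem is_repetition_loop_spec : Claim_equal_is_repetition_loop := by
  intro text threshold _
  unfold Spec_is_repetition_loop is_repetition_loop is_repetition_loop_alt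
  by_cases h : PySem.Str.split₀ text = []
  · simp only [h]
    rw [(PySem.List.sorted_eq_nil_iff ([] : List String) (fun w : String => w) false).mpr rfl]
    simp
  · simp only [h, if_false]
    rw [PySem.Dict.foldl_insert_getD_add_one_eq_counter]
    rw [max_counter_iff_any _ _ h]
    exact any_count_eq_scan _ _
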